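-- pv_equiv track=rewrite | github.com/PeaceChanpornpakdee/FRA141_Assignment_Generator | List_II_64_01.py | checkStock
-- ===== SOURCE A (Python) =====
-- def checkStock (stockList):
--     itemList = []
--     amountList = []
--
--     for s in stockList:
--         if s not in itemList:
--             itemList.append(s)
--             amountList.append(1)
--
--         else:
--             idx = itemList.index(s)
--             amountList[idx] += 1
--
--     ansList = []
--
--     for i in range(len(itemList)):
--         ansList.append([ itemList[i] , amountList[i] ])
--
--     ansList = sorted(ansList)
--
--     return ansList
-- ===== SOURCE B (Python) =====
-- def checkStock(stockList):
--     s = sorted(stockList)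
--     if not s:
--         return []
--     result = []
--     cur = s[0]
--     cnt = 1
--     for x in s[1:]:
--         if x == cur:
--             cnt += 1
--         else:
--             result.append([cur, cnt])
--             cur = x
--             cnt = 1
--     result.append([cur, cnt])
--     return result
-- ===== Notes on version B (the rewrite author's own statement) =====
-- stated objective: faster
-- what changed: Sort the list first and count each run of equal items in one grouping pass, instead of a membership-search/list.index tally followed by a final sort.
import Mathlib
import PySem

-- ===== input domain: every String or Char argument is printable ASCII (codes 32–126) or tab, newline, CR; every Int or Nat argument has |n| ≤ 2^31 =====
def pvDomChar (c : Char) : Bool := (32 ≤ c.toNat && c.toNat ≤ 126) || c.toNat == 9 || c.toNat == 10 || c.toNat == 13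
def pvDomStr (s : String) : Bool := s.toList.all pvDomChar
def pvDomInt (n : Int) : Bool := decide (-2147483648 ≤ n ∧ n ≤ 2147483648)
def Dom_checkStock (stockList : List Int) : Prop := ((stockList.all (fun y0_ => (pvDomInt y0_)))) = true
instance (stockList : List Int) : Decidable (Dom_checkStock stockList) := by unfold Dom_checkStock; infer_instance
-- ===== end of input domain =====

-- B replaces A's membership-search/list.index tally followed by a final sort with sort-first-then-group-runs in one pass (neither mutates the argument).

-- ===== PORT A =====
-- A's first loop: build itemList/amountList; 'amountList[idx] += 1' via List.modify (index? is always some in that branch, since s ∈ itemList).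
def checkStockTally (stockList : List Int) : List Int × List Int :=
  stockList.foldl
    (fun (p : List Int × List Int) s =>
      if s ∉ p.1 then (p.1 ++ [s], p.2 ++ [1])
      else
        match PySem.List.index? p.1 s with
        | some idx => (p.1, p.2.modify idx (· + 1))
        | none => (p.1, p.2))
    ([], [])

def checkStock (stockList : List Int) : List (List Int) :=
  let p := checkStockTally stockList
  let ansList := (PySem.List.pyRange 0 (p.1.length : Int) 1).foldl
    (fun acc i => acc ++ [[PySem.List.pyGetD p.1 i 0, PySem.List.pyGetD p.2 i 0]]) []
  PySem.List.sorted ansList (fun x => x) false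

-- ===== PORT B =====
-- sort, then one grouping pass: loop over s[1:] with state (result, cur, cnt), flushing [cur, cnt] on each change of item and once at the end
def checkStock_alt (stockList : List Int) : List (List Int) :=
  match PySem.List.sorted stockList (fun x => x) false with
  | [] => []
  | h :: t =>
    let q := t.foldl
      (fun (p : List (List Int) × Int × Int) x =>
        if x = p.2.1 then (p.1, p.2.1, p.2.2 + 1)
        else (p.1 ++ [[p.2.1, p.2.2]], x, 1)) ([], h, 1)
    q.1 ++ [[q.2.1, q.2.2]]

-- ===== PRECONDITION & SPEC =====
def Spec_checkStock (stockList : List Int) (out : List (List Int)) : Prop := out = checkStock_alt stockList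
instance (stockList : List Int) (out : List (List Int)) : Decidable (Spec_checkStock stockList out) := by unfold Spec_checkStock; infer_instance

-- ===== CLAIM (what is proved, stated in full; the proofs are below) =====
def Claim_equal_checkStock : Prop := ∀ (stockList : List Int), Dom_checkStock stockList → Spec_checkStock stockList (checkStock stockList)

-- ===== LEMMAS AND PROOFS =====

-- the pair each distinct item contributes: [item, its count in the input]
def pairOf (s : List Int) (x : Int) : List Int := [x, (s.count x : Int)]

-- the run keys of a (sorted) list, in order of first appearance
def skeys : List Int → List Int
  | [] => []
  | x :: t => x :: skeys (t.filter (fun y => x < y))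
termination_by l => l.length
decreasing_by simp only [List.length_cons, Nat.lt_succ_iff, List.length_unattach]; exact le_trans (List.length_filter_le _ _) (by simp)

-- B's run-grouping, as a structural recursion
def go : List Int → Int → Int → List (List Int)
  | [], cur, cnt => [[cur, cnt]]
  | x :: t, cur, cnt => if x = cur then go t cur (cnt + 1) else [cur, cnt] :: go t x 1

theorem skeys_nil : skeys [] = [] := by rw [skeys]
theorem skeys_cons (x : Int) (t : List Int) : skeys (x :: t) = x :: skeys (t.filter (fun y => x < y)) := by rw [skeys]

theorem skeys_subset : ∀ (l : List Int), ∀ y ∈ skeys l, y ∈ l := by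
  intro l
  fun_induction skeys l with
  | case1 => simp
  | case2 x t ih =>
    rw [List.unattach_filter (hf := fun a h => rfl), List.unattach_attach] at ih
    intro y hy
    rcases List.mem_cons.1 hy with h | h
    · simp [h]
    · exact List.mem_cons_of_mem _ (List.mem_of_mem_filter (ih y h))

theorem skeys_pairwise : ∀ (l : List Int), (skeys l).Pairwise (· < ·) := by
  intro l
  fun_induction skeys l with
  | case1 => simp
  | case2 x t ih =>
    rw [List.unattach_filter (hf := fun a h => rfl), List.unattach_attach] at ih
    refine List.pairwise_cons.2 ⟨?_, ih⟩
    intro y hy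
    have := List.of_mem_filter (skeys_subset _ y hy)
    simpa using this

theorem mem_skeys_of_sorted : ∀ (l : List Int), l.Pairwise (· ≤ ·) → ∀ y ∈ l, y ∈ skeys l := by
  intro l
  fun_induction skeys l with
  | case1 => simp
  | case2 x t ih =>
    rw [List.unattach_filter (hf := fun a h => rfl), List.unattach_attach] at ih
    intro hp y hy
    rcases List.mem_cons.1 hy with rfl | h
    · exact List.mem_cons_self ..
    · have hx : x ≤ y := (List.pairwise_cons.1 hp).1 y h
      rcases eq_or_lt_of_le hx with rfl | hlt
      · exact List.mem_cons_self ..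
      · exact List.mem_cons_of_mem _ (ih ((List.pairwise_cons.1 hp).2.filter _)
          y (List.mem_filter.2 ⟨h, decide_eq_true hlt⟩))

theorem foldl_go (t : List Int) : ∀ (acc : List (List Int)) (cur cnt : Int),
    ((t.foldl
      (fun (p : List (List Int) × Int × Int) x =>
        if x = p.2.1 then (p.1, p.2.1, p.2.2 + 1)
        else (p.1 ++ [[p.2.1, p.2.2]], x, 1)) (acc, cur, cnt)).1
     ++ [[(t.foldl
      (fun (p : List (List Int) × Int × Int) x =>
        if x = p.2.1 then (p.1, p.2.1, p.2.2 + 1)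
        else (p.1 ++ [[p.2.1, p.2.2]], x, 1)) (acc, cur, cnt)).2.1,
        (t.foldl
      (fun (p : List (List Int) × Int × Int) x =>
        if x = p.2.1 then (p.1, p.2.1, p.2.2 + 1)
        else (p.1 ++ [[p.2.1, p.2.2]], x, 1)) (acc, cur, cnt)).2.2]])
    = acc ++ go t cur cnt := by
  induction t with
  | nil => intro acc cur cnt; simp [go]
  | cons x t ih =>
    intro acc cur cnt
    simp only [List.foldl_cons]
    by_cases h : x = cur
    · simp only [go, h, if_pos]
      exact ih acc cur (cnt + 1)
    · simp only [go, if_neg h]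
      rw [ih (acc ++ [[cur, cnt]]) x 1]
      simp

theorem go_spec : ∀ (l : List Int) (cur cnt : Int), l.Pairwise (· ≤ ·) → (∀ x ∈ l, cur ≤ x) →
    go l cur cnt = [cur, cnt + (l.count cur : Int)] ::
      (skeys (l.filter (fun y => cur < y))).map (fun y => [y, (l.count y : Int)]) := by
  intro l
  induction l with
  | nil => intro cur cnt _ _; simp [go, skeys_nil]
  | cons x t ih =>
    intro cur cnt hp hle
    have hxt : ∀ z ∈ t, x ≤ z := (List.pairwise_cons.1 hp).1
    have hpt : t.Pairwise (· ≤ ·) := (List.pairwise_cons.1 hp).2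
    by_cases h : x = cur
    · subst h
      rw [go, if_pos rfl, ih x (cnt + 1) hpt hxt]
      have hf : (x :: t).filter (fun y => decide (x < y)) = t.filter (fun y => decide (x < y)) := by
        simp
      rw [List.filter_cons_of_neg (by simp)]
      congr 1
      · simp [List.count_cons_self]; omega
      · apply List.map_congr_left
        intro y hy
        have hyf := List.of_mem_filter (skeys_subset _ y hy)
        have : x < y := by simpa using hyf
        rw [List.count_cons_of_ne (by omega)]
    · have hcx : cur < x := lt_of_le_of_ne (hle x (by simp)) (Ne.symm h)
      rw [go, if_neg h, ih x 1 hpt hxt]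
      have hall : ∀ z ∈ (x :: t), cur < z := by
        intro z hz
        rcases List.mem_cons.1 hz with rfl | hz'
        · exact hcx
        · exact lt_of_lt_of_le hcx (hxt z hz')
      have hcnt0 : (x :: t).count cur = 0 := by
        refine List.count_eq_zero.2 ?_
        intro hmem
        exact absurd (hall cur hmem) (lt_irrefl cur)
      have hfull : (x :: t).filter (fun y => decide (cur < y)) = x :: t := by
        refine List.filter_eq_self.2 ?_
        intro z hz
        exact decide_eq_true (hall z hz)
      rw [hfull, skeys_cons, hcnt0]
      simp only [List.map_cons]
      congr 1
      · simp
      congr 1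
      · simp [List.count_cons_self]; omega
      · apply List.map_congr_left
        intro y hy
        have : x < y := by simpa using List.of_mem_filter (skeys_subset _ y hy)
        rw [List.count_cons_of_ne (by omega)]

theorem alt_eq_map (s : List Int) :
    checkStock_alt s = (skeys (PySem.List.sorted s (fun x => x) false)).map (pairOf s) := by
  unfold checkStock_alt
  have hcnt : ∀ y, (PySem.List.sorted s (fun x => x) false).count y = s.count y := by
    intro y
    exact (PySem.List.sorted_perm s (fun x => x) false).count_eq y
  cases hs : PySem.List.sorted s (fun x => x) false with
  | nil => simp [skeys_nil]
  | cons h t =>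
    have hp : (h :: t).Pairwise (· ≤ ·) := by
      have := PySem.List.sorted_pairwise s (fun x => x)
      rwa [hs] at this
    have hxt : ∀ z ∈ t, h ≤ z := (List.pairwise_cons.1 hp).1
    have hpt : t.Pairwise (· ≤ ·) := (List.pairwise_cons.1 hp).2
    simp only []
    rw [foldl_go, go_spec t h 1 hpt hxt, skeys_cons]
    rw [List.nil_append, List.map_cons]
    congr 1
    · have := hcnt h
      rw [hs] at this
      unfold pairOf
      rw [← this, List.count_cons_self]
      simp; omega
    · apply List.map_congr_left
      intro y hy
      have hxy : h < y := by
        simpa using List.of_mem_filter (skeys_subset _ y hy)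
      have := hcnt y
      rw [hs] at this
      unfold pairOf
      rw [← this, List.count_cons_of_ne (by omega)]

theorem tally_inv : ∀ (rest pre : List Int) (p : List Int × List Int),
    p.1.Nodup → (∀ x, x ∈ p.1 ↔ x ∈ pre) → p.2 = p.1.map (fun x => (pre.count x : Int)) →
    ((rest.foldl
      (fun (p : List Int × List Int) s =>
        if s ∉ p.1 then (p.1 ++ [s], p.2 ++ [1])
        else
          match PySem.List.index? p.1 s with
          | some idx => (p.1, p.2.modify idx (· + 1))
          | none => (p.1, p.2)) p).1.Nodup ∧
     (∀ x, x ∈ (rest.foldl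
      (fun (p : List Int × List Int) s =>
        if s ∉ p.1 then (p.1 ++ [s], p.2 ++ [1])
        else
          match PySem.List.index? p.1 s with
          | some idx => (p.1, p.2.modify idx (· + 1))
          | none => (p.1, p.2)) p).1 ↔ x ∈ pre ++ rest) ∧
     (rest.foldl
      (fun (p : List Int × List Int) s =>
        if s ∉ p.1 then (p.1 ++ [s], p.2 ++ [1])
        else
          match PySem.List.index? p.1 s with
          | some idx => (p.1, p.2.modify idx (· + 1))
          | none => (p.1, p.2)) p).2 =
       (rest.foldl
      (fun (p : List Int × List Int) s =>
        if s ∉ p.1 then (p.1 ++ [s], p.2 ++ [1])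
        else
          match PySem.List.index? p.1 s with
          | some idx => (p.1, p.2.modify idx (· + 1))
          | none => (p.1, p.2)) p).1.map (fun x => ((pre ++ rest).count x : Int))) := by
  intro rest
  induction rest with
  | nil =>
    intro pre p h1 h2 h3
    simpa using ⟨h1, h2, h3⟩
  | cons r rest ih =>
    intro pre p h1 h2 h3
    simp only [List.foldl_cons]
    by_cases hr : r ∈ p.1
    · -- else branch: increment the existing count
      obtain ⟨idx, hidx⟩ : ∃ idx, PySem.List.index? p.1 r = some idx := by
        have := (PySem.List.index?_isSome_iff (xs := p.1) (v := r)).2 hr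
        exact Option.isSome_iff_exists.1 this
      obtain ⟨hlt, hget, -⟩ := PySem.List.getElem_of_index?_eq_some hidx
      have hstep : (if r ∉ p.1 then (p.1 ++ [r], p.2 ++ [1])
          else
            match PySem.List.index? p.1 r with
            | some idx => (p.1, p.2.modify idx (· + 1))
            | none => (p.1, p.2)) = (p.1, p.2.modify idx (· + 1)) := by
        rw [if_neg (by simpa using hr), hidx]
      rw [hstep]
      have h2' : ∀ x, x ∈ p.1 ↔ x ∈ pre ++ [r] := by
        intro x
        simp only [List.mem_append, List.mem_singleton]
        constructor
        · intro hx; exact Or.inl ((h2 x).1 hx)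
        · rintro (hx | rfl)
          · exact (h2 x).2 hx
          · exact hr
      have hlen : p.2.length = p.1.length := by rw [h3]; simp
      have h3' : p.2.modify idx (· + 1) = p.1.map (fun x => ((pre ++ [r]).count x : Int)) := by
        apply List.ext_getElem
        · simp [hlen]
        · intro j hj hj2
          rw [List.getElem_modify]
          have hj1 : j < p.1.length := by simpa using hj2
          have hpj : p.2[j]'(by simpa [hlen] using hj1) = (pre.count (p.1[j]'hj1) : Int) := by
            have := congrArg (fun l => l[j]?) h3
            simp only [List.getElem?_map] at this
            rw [List.getElem_eq_iff]
            simp [this, List.getElem?_eq_getElem hj1]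
          rw [hpj]
          by_cases he : idx = j
          · subst he
            rw [if_pos rfl]
            simp [List.getElem_map, hget]
          · have hne : p.1[j]'hj1 ≠ r := by
              intro hc
              exact he (h1.getElem_inj_iff.1 (by rw [hget, hc]) ).symm
            have hne' : ¬ r = p.1[j]'hj1 := fun hc => hne hc.symm
            rw [if_neg he]
            simp [hne']
      have := ih (pre ++ [r]) (p.1, p.2.modify idx (· + 1)) h1 h2' h3'
      simpa using this
    · -- then branch: append new item with count 1
      have hstep : (if r ∉ p.1 then (p.1 ++ [r], p.2 ++ [1])
          else
            match PySem.List.index? p.1 r with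
            | some idx => (p.1, p.2.modify idx (· + 1))
            | none => (p.1, p.2)) = (p.1 ++ [r], p.2 ++ [1]) := by
        rw [if_pos (by simpa using hr)]
      rw [hstep]
      have hrpre : r ∉ pre := fun hc => hr ((h2 r).2 hc)
      have h1' : (p.1 ++ [r]).Nodup := by
        simp [List.nodup_append, h1]
        intro a ha hc
        exact hr (hc ▸ ha)
      have h2' : ∀ x, x ∈ p.1 ++ [r] ↔ x ∈ pre ++ [r] := by
        intro x
        simp only [List.mem_append, List.mem_singleton]
        exact or_congr_left (h2 x)
      have h3' : p.2 ++ [1] = (p.1 ++ [r]).map (fun x => ((pre ++ [r]).count x : Int)) := by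
        rw [List.map_append, h3]
        congr 1
        · apply List.map_congr_left
          intro x hx
          have hxr : x ≠ r := fun hc => hr (hc ▸ hx)
          simp [List.count_append, Ne.symm hxr]
        · simp [List.count_append, List.count_singleton, List.count_eq_zero, hrpre]
      have := ih (pre ++ [r]) (p.1 ++ [r], p.2 ++ [1]) h1' h2' h3'
      simpa using this

theorem checkStock_eq_sorted_map (s : List Int) :
    checkStock s = PySem.List.sorted ((checkStockTally s).1.map (pairOf s)) (fun x => x) false := by
  unfold checkStock checkStockTally
  obtain ⟨h1, h2, h3⟩ := tally_inv s [] ([], []) (by simp) (by simp) (by simp)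
  simp only [List.nil_append] at h1 h2 h3
  simp only []
  congr 1
  rw [PySem.List.foldl_append_singleton_eq_map, List.nil_append]
  rw [PySem.List.pyRange_zero_natCast, List.map_map]
  apply List.ext_getElem
  · simp
  · intro i hi hi2
    simp only [List.getElem_map, List.getElem_range, Function.comp_apply]
    simp only [List.length_map, List.length_range] at hi
    have hlen2 := congrArg List.length h3
    simp only [List.length_map] at hlen2
    rw [PySem.List.pyGetD_natCast, PySem.List.pyGetD_natCast,
      List.getD_eq_getElem _ _ hi, List.getD_eq_getElem _ _ (by omega)]
    unfold pairOf
    congr 1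
    congr 1
    have := congrArg (fun l => l[i]?) h3
    simp only [List.getElem?_map] at this
    rw [List.getElem_eq_iff, this, List.getElem?_eq_getElem hi, Option.map_some]

theorem sorted_inst_eq (xs : List (List Int)) :
    @PySem.List.sorted _ _ List.instLT (fun a b => a.decidableLT b) xs (fun x => x) false
    = @PySem.List.sorted _ _ List.instLinearOrder.toLT LinearOrder.toDecidableLT xs (fun x => x) false := by
  congr 1

theorem checkStock_eq_alt : ∀ (s : List Int), checkStock s = checkStock_alt s := by
  intro s
  rw [checkStock_eq_sorted_map, alt_eq_map, sorted_inst_eq]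
  obtain ⟨h1, h2, h3⟩ := tally_inv s [] ([], []) (by simp) (by simp) (by simp)
  simp only [List.nil_append] at h1 h2
  have hK := skeys_pairwise (PySem.List.sorted s (fun x => x) false)
  have hKnodup : (skeys (PySem.List.sorted s (fun x => x) false)).Nodup :=
    hK.imp (fun h => ne_of_lt h)
  have hmemK : ∀ y, y ∈ skeys (PySem.List.sorted s (fun x => x) false) ↔ y ∈ s := by
    intro y
    constructor
    · intro hy
      exact (PySem.List.mem_sorted ..).1 (skeys_subset _ y hy)
    · intro hy
      exact mem_skeys_of_sorted _ (PySem.List.sorted_pairwise s (fun x => x)) y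
        ((PySem.List.mem_sorted ..).2 hy)
  apply PySem.List.sorted_eq_of_perm_of_pairwise_lt
  · exact ((List.perm_ext_iff_of_nodup hKnodup h1).2
      (fun a => (hmemK a).trans (h2 a).symm)).map (pairOf s)
  · refine List.pairwise_map.2 (hK.imp ?_)
    intro a b hab
    simp only [pairOf, List.cons_lt_cons_iff]
    left; exact hab

-- ===== VERDICT (by name: the statement is the Claim_ definition above) =====
theorem checkStock_spec : Claim_equal_checkStock := fun s _ => checkStock_eq_alt s
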